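-- pv_equiv track=rewrite | github.com/mab3321/pws | export/app.py | validate_single_files
-- ===== SOURCE A (Python) =====
-- def validate_single_files(filenames):
--     """Ensure single files contain both 'fty' and 'pl' in their names."""
--     required_patterns = ['fty', 'pl']
--     found_patterns = {pattern: False for pattern in required_patterns}
--
--     for name in filenames:
--         for pattern in required_patterns:
--             if pattern in name:
--                 found_patterns[pattern] = True
--
--     # Ensure all required patterns are found
--     return all(found_patterns.values())
-- ===== SOURCE B (Python) =====
-- def validate_single_files(filenames):
--     """Ensure single files contain both 'fty' and 'pl' in their names."""
--     return any('fty' in name for name in filenames) and any('pl' in name for name in filenames)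
-- ===== Notes on version B (the rewrite author's own statement) =====
-- stated objective: idiomatic
-- what changed: Replaced the flag-dictionary accumulation pass with two independent short-circuiting any() membership scans combined by boolean and, maintaining no intermediate state.
import Mathlib
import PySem

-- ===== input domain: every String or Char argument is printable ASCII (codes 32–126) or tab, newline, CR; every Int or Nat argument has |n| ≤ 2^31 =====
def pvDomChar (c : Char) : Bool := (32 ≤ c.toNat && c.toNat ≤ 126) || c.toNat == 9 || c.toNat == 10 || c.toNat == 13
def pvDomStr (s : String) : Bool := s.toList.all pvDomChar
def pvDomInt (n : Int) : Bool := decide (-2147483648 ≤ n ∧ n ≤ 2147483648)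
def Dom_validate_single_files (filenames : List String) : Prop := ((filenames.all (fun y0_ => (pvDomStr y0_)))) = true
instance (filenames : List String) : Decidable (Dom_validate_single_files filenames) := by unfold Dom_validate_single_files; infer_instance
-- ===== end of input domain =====

-- B replaces A's flag-dictionary pass with two independent short-circuiting membership scans (idiomatic; no speed claim).

-- ===== PORT A =====
def validate_single_files (filenames : List String) : Bool :=
  let required_patterns : List String := ["fty", "pl"]
  let found_patterns : PySem.Dict String Bool :=
    required_patterns.foldl (fun d pattern => d.insert pattern false) PySem.Dict.empty
  let found_patterns := filenames.foldl (fun d name =>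
    required_patterns.foldl (fun d pattern =>
      if PySem.Str.isIn pattern name then d.insert pattern true else d) d) found_patterns
  found_patterns.values.all (fun v => v)

-- ===== PORT B =====
def validate_single_files_alt (filenames : List String) : Bool :=
  filenames.any (fun name => PySem.Str.isIn "fty" name) &&
  filenames.any (fun name => PySem.Str.isIn "pl" name)

-- ===== PRECONDITION & SPEC =====
def Spec_validate_single_files (filenames : List String) (out : Bool) : Prop := out = validate_single_files_alt filenames
instance (filenames : List String) (out : Bool) : Decidable (Spec_validate_single_files filenames out) := by unfold Spec_validate_single_files; infer_instance

-- ===== CLAIM (what is proved, stated in full; the proofs are below) =====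
def Claim_equal_validate_single_files : Prop := ∀ (filenames : List String), Dom_validate_single_files filenames → Spec_validate_single_files filenames (validate_single_files filenames)

-- ===== LEMMAS AND PROOFS =====

-- One iteration of A's outer loop on the two-flag dict: the inner pattern loop
-- or-s each flag with the corresponding membership test of `name`.
theorem pv_step (name : String) (f p : Bool) :
    (["fty", "pl"] : List String).foldl (fun d pattern =>
        if PySem.Str.isIn pattern name then d.insert pattern true else d)
      (PySem.Dict.mk [("fty", f), ("pl", p)])
    = PySem.Dict.mk [("fty", f || PySem.Str.isIn "fty" name),
                     ("pl", p || PySem.Str.isIn "pl" name)] := by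
  simp only [List.foldl_cons, List.foldl_nil]
  by_cases hf : PySem.Chars.isIn ['f', 't', 'y'] name.toList <;>
    by_cases hp : PySem.Chars.isIn ['p', 'l'] name.toList <;>
      simp [PySem.Str.isIn, hf, hp, PySem.Dict.insert, PySem.Dict.contains]

-- Invariant of A's fold over the filenames, started from the two-flag dict (f, p).
theorem pv_loop (fns : List String) (f p : Bool) :
    fns.foldl (fun d name =>
      (["fty", "pl"] : List String).foldl (fun d pattern =>
        if PySem.Str.isIn pattern name then d.insert pattern true else d) d)
      (PySem.Dict.mk [("fty", f), ("pl", p)])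
    = PySem.Dict.mk [("fty", f || fns.any (fun name => PySem.Str.isIn "fty" name)),
                     ("pl", p || fns.any (fun name => PySem.Str.isIn "pl" name))] := by
  induction fns generalizing f p with
  | nil => simp
  | cons hd tl ih =>
    rw [List.foldl_cons, pv_step, ih]
    simp [Bool.or_assoc]

-- ===== VERDICT (by name: the statement is the Claim_ definition above) =====
theorem validate_single_files_spec : Claim_equal_validate_single_files := by
  intro filenames _
  show validate_single_files filenames = validate_single_files_alt filenames
  simp only [validate_single_files, validate_single_files_alt]
  rw [show (["fty", "pl"] : List String).foldl (fun d pattern => d.insert pattern false)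
        PySem.Dict.empty = PySem.Dict.mk [("fty", false), ("pl", false)] from by decide,
      pv_loop]
  simp
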